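-- pv_equiv track=rewrite | github.com/natimellino/Complementos-I | practica3.py | esCaminoEuleriano
-- ===== SOURCE A (Python) =====
-- def esCaminoEuleriano(grafo, camino):
--     aristas = grafo[1]
--     corregidas = []
--     longCamino = len(camino)
--
--     if longCamino != len(aristas):
--         return False
--
--     if longCamino != 0:
--         ultimaVisitada = camino[0][0]
--
--     for arista in camino:
--         if arista in aristas and arista not in corregidas and arista[0] == ultimaVisitada:
--             corregidas.append(arista)
--             ultimaVisitada = arista[1]
--         else:
--             return False
--
--     return True
-- ===== SOURCE B (Python) =====
-- def esCaminoEuleriano(grafo, camino):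
--     aristas = grafo[1]
--     if len(camino) != len(aristas):
--         return False
--     if not camino:
--         return True
--     connected = all(camino[i][1] == camino[i + 1][0] for i in range(len(camino) - 1))
--     in_graph = all(e in aristas for e in camino)
--     distinct = True
--     seen = []
--     for e in camino:
--         if e in seen:
--             distinct = False
--         seen.append(e)
--     return connected and in_graph and distinct
-- ===== Notes on version B (the rewrite author's own statement) =====
-- stated objective: alternative
-- what changed: Replaces A's single stateful early-exit loop (accumulating 'corregidas' and 'ultimaVisitada') by the conjunction of three independent passes: consecutive-pair connectivity, membership of every edge in the graph's edge list, and edge distinctness via a seen-list.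
import Mathlib
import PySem

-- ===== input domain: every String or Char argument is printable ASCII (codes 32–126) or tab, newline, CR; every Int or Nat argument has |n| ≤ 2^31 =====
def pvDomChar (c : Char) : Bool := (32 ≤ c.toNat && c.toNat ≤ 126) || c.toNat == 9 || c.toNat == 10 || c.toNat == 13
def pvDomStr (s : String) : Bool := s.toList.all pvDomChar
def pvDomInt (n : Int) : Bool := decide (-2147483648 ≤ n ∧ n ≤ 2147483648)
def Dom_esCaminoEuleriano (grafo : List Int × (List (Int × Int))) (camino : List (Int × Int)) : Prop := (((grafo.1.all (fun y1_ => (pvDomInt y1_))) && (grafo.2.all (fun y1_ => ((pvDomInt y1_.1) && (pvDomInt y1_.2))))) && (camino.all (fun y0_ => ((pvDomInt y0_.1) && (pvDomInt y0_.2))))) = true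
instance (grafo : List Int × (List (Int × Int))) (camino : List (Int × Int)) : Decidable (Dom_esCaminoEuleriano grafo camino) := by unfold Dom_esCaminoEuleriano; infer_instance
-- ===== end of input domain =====

-- B replaces A's single stateful early-exit loop by three independent passes
-- (connectivity, membership, distinctness); objective: alternative decomposition.


-- ===== PORT A =====
-- A's for-loop with early return, state = (corregidas, ultimaVisitada)
def pvALoop (aristas : List (Int × Int)) : List (Int × Int) → Int → List (Int × Int) → Bool
  | _, _, [] => true
  | corregidas, ultima, arista :: rest =>
      if arista ∈ aristas ∧ arista ∉ corregidas ∧ arista.1 = ultima then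
        pvALoop aristas (corregidas ++ [arista]) arista.2 rest
      else false

def esCaminoEuleriano (grafo : List Int × (List (Int × Int))) (camino : List (Int × Int)) : Bool :=
  let aristas := grafo.2
  if camino.length ≠ aristas.length then false
  else
    match camino with
    | [] => true
    | (a, _) :: _ => pvALoop aristas [] a camino

-- ===== PORT B =====
-- pass 1: consecutive pairs connect
def pvConn : List (Int × Int) → Bool
  | e1 :: e2 :: rest => (e1.2 == e2.1) && pvConn (e2 :: rest)
  | _ => true

-- pass 3: no edge repeats, seen-list with a flag (as in Source B)
def pvDistinct : List (Int × Int) → Bool → List (Int × Int) → Bool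
  | _, flag, [] => flag
  | seen, flag, e :: rest =>
      pvDistinct (seen ++ [e]) (if e ∈ seen then false else flag) rest

def esCaminoEuleriano_alt (grafo : List Int × (List (Int × Int))) (camino : List (Int × Int)) : Bool :=
  let aristas := grafo.2
  if camino.length ≠ aristas.length then false
  else if camino = [] then true
  else pvConn camino && camino.all (fun e => decide (e ∈ aristas)) && pvDistinct [] true camino

-- ===== PRECONDITION & SPEC =====
def Spec_esCaminoEuleriano (grafo : List Int × (List (Int × Int))) (camino : List (Int × Int)) (out : Bool) : Prop := out = esCaminoEuleriano_alt grafo camino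
instance (grafo : List Int × (List (Int × Int))) (camino : List (Int × Int)) (out : Bool) : Decidable (Spec_esCaminoEuleriano grafo camino out) := by unfold Spec_esCaminoEuleriano; infer_instance

-- ===== CLAIM (what is proved, stated in full; the proofs are below) =====
def Claim_equal_esCaminoEuleriano : Prop := ∀ (grafo : List Int × (List (Int × Int))) (camino : List (Int × Int)), Dom_esCaminoEuleriano grafo camino → Spec_esCaminoEuleriano grafo camino (esCaminoEuleriano grafo camino)

-- ===== LEMMAS AND PROOFS =====

-- chain check starting from a given vertex (A's ultimaVisitada discipline)
def pvChain : Int → List (Int × Int) → Bool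
  | _, [] => true
  | u, e :: rest => decide (e.1 = u) && pvChain e.2 rest

-- distinctness relative to an already-seen prefix
def pvFresh : List (Int × Int) → List (Int × Int) → Bool
  | _, [] => true
  | seen, e :: rest => !(decide (e ∈ seen)) && pvFresh (seen ++ [e]) rest

theorem pvALoop_eq (aristas : List (Int × Int)) :
    ∀ (l corr : List (Int × Int)) (u : Int),
      pvALoop aristas corr u l
        = (pvChain u l && l.all (fun e => decide (e ∈ aristas)) && pvFresh corr l) := by
  intro l
  induction l with
  | nil => intro corr u; simp [pvALoop, pvChain, pvFresh]
  | cons e rest ih =>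
      intro corr u
      by_cases h1 : e ∈ aristas <;> by_cases h2 : e ∈ corr <;> by_cases h3 : e.1 = u <;>
        simp [pvALoop, pvChain, pvFresh, h1, h2, h3, ih]

theorem pvChain_conn : ∀ (rest : List (Int × Int)) (p : Int × Int),
    pvChain p.2 rest = pvConn (p :: rest) := by
  intro rest
  induction rest with
  | nil => intro p; simp [pvChain, pvConn]
  | cons e r ih =>
      intro p
      have he : (p.2 == e.1) = decide (e.1 = p.2) := by
        rcases eq_or_ne e.1 p.2 with h | h
        · simp [h]
        · simp [h, Ne.symm h]
      simp [pvChain, pvConn, ← ih, he]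

theorem pvDistinct_eq : ∀ (l seen : List (Int × Int)) (flag : Bool),
    pvDistinct seen flag l = (flag && pvFresh seen l) := by
  intro l
  induction l with
  | nil => intro seen flag; simp [pvDistinct, pvFresh]
  | cons e rest ih =>
      intro seen flag
      by_cases h : e ∈ seen <;>
        simp [pvDistinct, pvFresh, h, ih]

theorem esCaminoEuleriano_spec : Claim_equal_esCaminoEuleriano := by
  intro grafo camino _
  unfold Spec_esCaminoEuleriano esCaminoEuleriano esCaminoEuleriano_alt
  cases camino with
  | nil => simp
  | cons p rest =>
      obtain ⟨a, b⟩ := p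
      have hbody : pvALoop grafo.2 [] a ((a, b) :: rest)
          = (pvConn ((a, b) :: rest)
              && ((a, b) :: rest).all (fun e => decide (e ∈ grafo.2))
              && pvDistinct [] true ((a, b) :: rest)) := by
        rw [pvALoop_eq, pvDistinct_eq]
        have hc := pvChain_conn rest (a, b)
        simp only [pvChain] at *
        simp [hc, Bool.and_assoc]
      simp [hbody, Bool.and_assoc]
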